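-- pv_equiv track=rewrite | github.com/yjz980120/graduation_handover | 图像分类解多分叉/datasets/pairwise_distance_crossing_old.py | get_linkages_with_thresh
-- ===== SOURCE A (Python) =====
-- def get_linkages_with_thresh(pos_dict, all_set, offspring_thresh):
--     # get parents within thresh
--     parent_dict = {}
--     for idx in all_set:
--         leaf = pos_dict[idx]
--         # exclude parent
--         os_id = 0
--         cur_set = []
--         while os_id < offspring_thresh:
--             try:
--                 p_leaf = pos_dict[leaf[-1]]
--                 cur_set.append(p_leaf[0])
--
--                 leaf = p_leaf # update leaf
--                 os_id += 1
--             except KeyError: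
--                 break
--         parent_dict[idx] = cur_set
--
--     offspring_dict = {}
--     #import ipdb;ipdb.set_trace()
--     for os, parents in parent_dict.items():
--         for p_idx in parents:
--             try:
--                 offspring_dict[p_idx].append(os)
--             except KeyError:
--                 offspring_dict[p_idx] = [os]
--     # convert to set
--     for key, value in parent_dict.items():
--         parent_dict[key] = set(value)
--     for key, value in offspring_dict.items():
--         offspring_dict[key] = set(value)
--
--     return parent_dict, offspring_dict
-- ===== SOURCE B (Python) =====
-- def get_linkages_with_thresh(pos_dict, all_set, offspring_thresh):
--     # Memoized chain computation: the bounded ancestor chain of a key is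
--     # computed at most once; later walks that reach an already-solved key
--     # splice in its memoized chain (truncated to the remaining budget)
--     # instead of re-walking it.
--     t = offspring_thresh
--     memo = {}  # key k -> full t-bounded ancestor chain starting at key k
--
--     def chain_from(k):
--         if k in memo:
--             return memo[k]
--         cur = pos_dict[k]
--         out = []
--         while len(out) < t:
--             nk = cur[-1]
--             if nk not in pos_dict:
--                 break
--             if nk in memo:
--                 out.append(pos_dict[nk][0])
--                 out.extend(memo[nk][: t - len(out)])
--                 break
--             cur = pos_dict[nk]
--             out.append(cur[0])
--         memo[k] = out
--         return out
--
--     parent_dict = {idx: chain_from(idx) for idx in all_set}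
--
--     offspring_dict = {}
--     for idx, parents in parent_dict.items():
--         for p in parents:
--             offspring_dict.setdefault(p, []).append(idx)
--
--     return ({k: set(v) for k, v in parent_dict.items()},
--             {k: set(v) for k, v in offspring_dict.items()})
-- ===== Notes on version B (the rewrite author's own statement) =====
-- stated objective: alternative
-- what changed: A re-walks the full threshold-bounded ancestor chain independently for every element of all_set; B memoizes the bounded chain per starting key and, when a walk reaches an already-solved key, splices that memoized chain truncated to the remaining budget instead of re-walking it, then builds the offspring dict by one setdefault inversion over the memoized chains.
-- outside the precondition, e.g. on get_linkages_with_thresh({1: [1], 2: [3], 3: []}, [1], 2): A returns ({1: {1}}, {1: {1}}), B returns ({1: {1}}, {1: {1}})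
import Mathlib
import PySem

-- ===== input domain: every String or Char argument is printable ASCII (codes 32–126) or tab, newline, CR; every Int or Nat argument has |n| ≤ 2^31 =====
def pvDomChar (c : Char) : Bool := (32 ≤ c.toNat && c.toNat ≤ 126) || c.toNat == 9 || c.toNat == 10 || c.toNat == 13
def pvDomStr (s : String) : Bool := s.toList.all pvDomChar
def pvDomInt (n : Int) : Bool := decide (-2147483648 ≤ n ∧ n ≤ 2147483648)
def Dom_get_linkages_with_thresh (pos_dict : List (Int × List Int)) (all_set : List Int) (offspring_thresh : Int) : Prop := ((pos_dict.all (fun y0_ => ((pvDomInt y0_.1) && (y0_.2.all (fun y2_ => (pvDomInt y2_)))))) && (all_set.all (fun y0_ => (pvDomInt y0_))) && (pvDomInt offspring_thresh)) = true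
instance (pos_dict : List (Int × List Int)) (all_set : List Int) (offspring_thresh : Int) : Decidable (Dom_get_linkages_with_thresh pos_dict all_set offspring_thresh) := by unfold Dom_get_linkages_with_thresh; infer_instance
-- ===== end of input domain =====

-- B replaces A's fresh per-element chain walks by a memoized chain table: each
-- key's bounded ancestor chain is computed at most once, later walks splice
-- the memoized chain truncated to the remaining budget (objective: alternative).

-- ===== PORT A =====
-- the inner while-loop of A: collects p_leaf[0] for each ancestor found, breaks on KeyError
def pvWalkA (pos : PySem.Dict Int (List Int)) : Nat → List Int → List Int → List Int
  | 0, _, acc => acc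
  | Nat.succ f, leaf, acc =>
    match pos.get? ((PySem.List.pyGet? leaf (-1)).getD 0) with
    | none => acc
    | some p_leaf => pvWalkA pos f p_leaf (acc ++ [(PySem.List.pyGet? p_leaf 0).getD 0])

def get_linkages_with_thresh (pos_dict : List (Int × List Int)) (all_set : List Int) (offspring_thresh : Int) : (List (Int × List Int)) × (List (Int × List Int)) :=
  let pos := PySem.Dict.ofList pos_dict
  -- pass 1: parent_dict[idx] = cur_set (a list)
  let parent : PySem.Dict Int (List Int) :=
    all_set.foldl (fun d idx =>
      d.insert idx (pvWalkA pos offspring_thresh.toNat ((pos.get? idx).getD []) [])) PySem.Dict.empty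
  -- pass 2: invert (try append / except KeyError insert)
  let offspring : PySem.Dict Int (List Int) :=
    parent.items.foldl (fun o pr =>
      pr.2.foldl (fun o p =>
        if o.contains p then o.modify p [] (fun l => l ++ [pr.1]) else o.insert p [pr.1]) o) PySem.Dict.empty
  -- passes 3 and 4: convert each value to a set (in-place overwrite keeps positions)
  (parent.items.map (fun pr => (pr.1, (PySem.Set.ofList pr.2 : List Int))),
   offspring.items.map (fun pr => (pr.1, (PySem.Set.ofList pr.2 : List Int))))

-- ===== PORT B =====
-- B's while-loop (guard len(out) < t rendered as fuel = t - len(out)): walks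
-- until the budget is spent, the chain leaves pos_dict, or a memoized key is
-- hit, in which case the memoized chain truncated to the remaining budget is
-- spliced in.  The Python slice bound t - len(out) is written with the cast
-- (t : Int); in every reachable state it equals the Python value since the
-- loop only runs when offspring_thresh > 0 (so toNat is exact).
def pvWalkM (pos : PySem.Dict Int (List Int)) (t : Nat) (memo : PySem.Dict Int (List Int)) :
    Nat → List Int → List Int → List Int
  | 0, _, out => out
  | Nat.succ f, cur, out =>
    match pos.get? ((PySem.List.pyGet? cur (-1)).getD 0) with
    | none => out
    | some nleaf =>
      match memo.get? ((PySem.List.pyGet? cur (-1)).getD 0) with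
      | some m =>
        let out2 := out ++ [(PySem.List.pyGet? nleaf 0).getD 0]
        out2 ++ PySem.List.slice m none (some ((t : Int) - out2.length))
      | none => pvWalkM pos t memo f nleaf (out ++ [(PySem.List.pyGet? nleaf 0).getD 0])

-- B's chain_from: memo lookup, else walk once and record the result
def pvChainFrom (pos : PySem.Dict Int (List Int)) (t : Nat) (memo : PySem.Dict Int (List Int)) (k : Int) :
    List Int × PySem.Dict Int (List Int) :=
  match memo.get? k with
  | some m => (m, memo)
  | none =>
    let out := pvWalkM pos t memo t ((pos.get? k).getD []) []
    (out, memo.insert k out)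

def get_linkages_with_thresh_alt (pos_dict : List (Int × List Int)) (all_set : List Int) (offspring_thresh : Int) : (List (Int × List Int)) × (List (Int × List Int)) :=
  let pos := PySem.Dict.ofList pos_dict
  let t := offspring_thresh.toNat
  -- parent_dict = {idx: chain_from(idx) for idx in all_set}, threading memo
  let st := all_set.foldl
    (fun (st : PySem.Dict Int (List Int) × PySem.Dict Int (List Int)) idx =>
      let r := pvChainFrom pos t st.2 idx
      (st.1.insert idx r.1, r.2))
    (PySem.Dict.empty, PySem.Dict.empty)
  let parent := st.1
  -- offspring_dict.setdefault(p, []).append(idx)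
  let offspring : PySem.Dict Int (List Int) :=
    parent.items.foldl (fun o pr =>
      pr.2.foldl (fun o p => o.insert p (o.getD p [] ++ [pr.1])) o) PySem.Dict.empty
  -- the two set-valued comprehensions
  (parent.items.map (fun pr => (pr.1, (PySem.Set.ofList pr.2 : List Int))),
   offspring.items.map (fun pr => (pr.1, (PySem.Set.ofList pr.2 : List Int))))

-- ===== PRECONDITION & SPEC =====
-- Pre_ excludes inputs where Python A raises (an idx of all_set missing from
-- pos_dict: KeyError; an empty value list reached by a walk: IndexError on
-- leaf[-1]); instead of re-simulating the walks it asks every value list that a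
-- walk COULD read (threshold positive and key listed in all_set or mentioned in
-- some value) to be nonempty, which also excludes some inputs A returns on (an
-- empty list a cycle keeps every walk away from — see the cite), where both
-- programs return the same value anyway.
def Pre_get_linkages_with_thresh (pos_dict : List (Int × List Int)) (all_set : List Int) (offspring_thresh : Int) : Prop :=
  (∀ i ∈ all_set, i ∈ pos_dict.map Prod.fst) ∧
  (∀ p ∈ pos_dict, (0 < offspring_thresh ∧ (p.1 ∈ all_set ∨ ∃ q ∈ pos_dict, p.1 ∈ q.2)) → p.2 ≠ [])
instance (pos_dict : List (Int × List Int)) (all_set : List Int) (offspring_thresh : Int) : Decidable (Pre_get_linkages_with_thresh pos_dict all_set offspring_thresh) := by unfold Pre_get_linkages_with_thresh; infer_instance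

def pvWitness_get_linkages_with_thresh : (List (Int × List Int)) × List Int × Int :=
  ([(1, [2]), (2, [3])], [1, 2], 2)

def Spec_get_linkages_with_thresh (pos_dict : List (Int × List Int)) (all_set : List Int) (offspring_thresh : Int) (out : (List (Int × List Int)) × (List (Int × List Int))) : Prop := out = get_linkages_with_thresh_alt pos_dict all_set offspring_thresh
instance (pos_dict : List (Int × List Int)) (all_set : List Int) (offspring_thresh : Int) (out : (List (Int × List Int)) × (List (Int × List Int))) : Decidable (Spec_get_linkages_with_thresh pos_dict all_set offspring_thresh out) := by unfold Spec_get_linkages_with_thresh; infer_instance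

-- ===== CLAIM (what is proved, stated in full; the proofs are below) =====
def Claim_equal_get_linkages_with_thresh : Prop := ∀ (pos_dict : List (Int × List Int)) (all_set : List Int) (offspring_thresh : Int), Dom_get_linkages_with_thresh pos_dict all_set offspring_thresh → Pre_get_linkages_with_thresh pos_dict all_set offspring_thresh → Spec_get_linkages_with_thresh pos_dict all_set offspring_thresh (get_linkages_with_thresh pos_dict all_set offspring_thresh)

-- ===== LEMMAS AND PROOFS =====

-- A's chain from key idx (what B's memo table must contain)
def pvCur (pos : PySem.Dict Int (List Int)) (n : Nat) (idx : Int) : List Int :=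
  pvWalkA pos n ((pos.get? idx).getD []) []

-- the memo invariant: every stored chain is A's chain from that key
def pvInv (pos : PySem.Dict Int (List Int)) (t : Nat) (memo : PySem.Dict Int (List Int)) : Prop :=
  ∀ k m, memo.get? k = some m → m = pvCur pos t k

theorem pvWalkA_acc (pos : PySem.Dict Int (List Int)) (f : Nat) (leaf acc : List Int) :
    pvWalkA pos f leaf acc = acc ++ pvWalkA pos f leaf [] := by
  induction f generalizing leaf acc with
  | zero => simp [pvWalkA]
  | succ f ih =>
    simp only [pvWalkA]
    cases h : pos.get? ((PySem.List.pyGet? leaf (-1)).getD 0) with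
    | none => simp
    | some p_leaf =>
      simp only []
      rw [ih, ih p_leaf ([] ++ _)]
      simp

-- truncation: a shorter-budget walk is a prefix of a longer one
theorem pvWalkA_take (pos : PySem.Dict Int (List Int)) (f g : Nat) (h : f ≤ g) (leaf : List Int) :
    pvWalkA pos f leaf [] = (pvWalkA pos g leaf []).take f := by
  induction f generalizing g leaf with
  | zero => simp [pvWalkA]
  | succ f ih =>
    cases g with
    | zero => omega
    | succ g =>
      simp only [pvWalkA]
      cases hp : pos.get? ((PySem.List.pyGet? leaf (-1)).getD 0) with
      | none => simp
      | some p_leaf =>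
        simp only []
        rw [pvWalkA_acc pos f, pvWalkA_acc pos g]
        simp only [List.nil_append, List.singleton_append, List.take_succ_cons]
        rw [ih g (by omega) p_leaf]

-- B's walk computes A's walk whenever the memo table is sound
theorem pvWalkM_eq (pos : PySem.Dict Int (List Int)) (t : Nat) (memo : PySem.Dict Int (List Int))
    (hInv : pvInv pos t memo) (f : Nat) (cur out : List Int) (hf : f + out.length = t) :
    pvWalkM pos t memo f cur out = out ++ pvWalkA pos f cur [] := by
  induction f generalizing cur out with
  | zero => simp [pvWalkM, pvWalkA]
  | succ f ih =>
    simp only [pvWalkM, pvWalkA]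
    cases hp : pos.get? ((PySem.List.pyGet? cur (-1)).getD 0) with
    | none => simp
    | some nleaf =>
      simp only []
      cases hm : memo.get? ((PySem.List.pyGet? cur (-1)).getD 0) with
      | none =>
        rw [ih nleaf (out ++ [(PySem.List.pyGet? nleaf 0).getD 0]) (by simp; omega)]
        rw [pvWalkA_acc pos f nleaf ([] ++ _)]
        simp
      | some m =>
        have hmA : m = pvWalkA pos t nleaf [] := by
          have h1 := hInv _ _ hm
          rw [h1, pvCur, hp]
          rfl
        simp only [hmA]
        have hb : ((t : Int) - ((out ++ [(PySem.List.pyGet? nleaf 0).getD 0]).length : Int)) = ((f : Nat) : Int) := by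
          simp only [List.length_append, List.length_cons, List.length_nil]
          push_cast
          omega
        rw [hb, PySem.List.slice_to_natCast, ← pvWalkA_take pos f t (by omega) nleaf]
        rw [pvWalkA_acc pos f nleaf ([] ++ [(PySem.List.pyGet? nleaf 0).getD 0])]
        simp

-- chain_from returns A's chain and preserves the invariant
theorem pvChainFrom_eq (pos : PySem.Dict Int (List Int)) (t : Nat) (memo : PySem.Dict Int (List Int))
    (hInv : pvInv pos t memo) (k : Int) :
    (pvChainFrom pos t memo k).1 = pvCur pos t k ∧ pvInv pos t (pvChainFrom pos t memo k).2 := by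
  unfold pvChainFrom
  cases hm : memo.get? k with
  | some m => exact ⟨hInv _ _ hm, hInv⟩
  | none =>
    simp only []
    have hw : pvWalkM pos t memo t ((pos.get? k).getD []) [] = pvCur pos t k := by
      rw [pvWalkM_eq pos t memo hInv t _ [] (by simp), pvCur]
      simp
    refine ⟨hw, ?_⟩
    intro k' m' hget
    rw [PySem.Dict.get?_insert] at hget
    split_ifs at hget with hk
    · cases hget; rw [hk, hw]
    · exact hInv _ _ hget

-- the threaded fold builds exactly A's parent dict
theorem pvMainFold (pos : PySem.Dict Int (List Int)) (t : Nat) (xs : List Int)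
    (d memo : PySem.Dict Int (List Int)) (hInv : pvInv pos t memo) :
    (xs.foldl (fun (st : PySem.Dict Int (List Int) × PySem.Dict Int (List Int)) idx =>
        let r := pvChainFrom pos t st.2 idx
        (st.1.insert idx r.1, r.2)) (d, memo)).1 =
      xs.foldl (fun d idx => d.insert idx (pvCur pos t idx)) d := by
  induction xs generalizing d memo with
  | nil => rfl
  | cons x xs ih =>
    simp only [List.foldl_cons]
    obtain ⟨h1, h2⟩ := pvChainFrom_eq pos t memo hInv x
    rw [show (pvChainFrom pos t memo x).1 = pvCur pos t x from h1] at *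
    exact ih _ _ h2

-- A's try/except inversion step written as one insert
theorem pvAstep_eq (o : PySem.Dict Int (List Int)) (i p : Int) :
    (if o.contains p then o.modify p [] (fun l => l ++ [i]) else o.insert p [i]) =
      o.insert p (o.getD p [] ++ [i]) := by
  by_cases h : o.contains p = true
  · simp [h, PySem.Dict.modify]
  · have h' : o.get? p = none := (PySem.Dict.get?_eq_none_iff_contains o p).2 (by simpa using h)
    simp [h, PySem.Dict.getD, h']

-- the two inversion folds agree
theorem pvInvFold_eq (items : List (Int × List Int)) (o : PySem.Dict Int (List Int)) :
    items.foldl (fun o pr =>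
      pr.2.foldl (fun o p =>
        if o.contains p then o.modify p [] (fun l => l ++ [pr.1]) else o.insert p [pr.1]) o) o =
    items.foldl (fun o pr =>
      pr.2.foldl (fun o p => o.insert p (o.getD p [] ++ [pr.1])) o) o := by
  induction items generalizing o with
  | nil => rfl
  | cons pr items ih =>
    simp only [List.foldl_cons]
    have hinner : ∀ (l : List Int) (o : PySem.Dict Int (List Int)),
        l.foldl (fun o p =>
          if o.contains p then o.modify p [] (fun s => s ++ [pr.1]) else o.insert p [pr.1]) o =
        l.foldl (fun o p => o.insert p (o.getD p [] ++ [pr.1])) o := by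
      intro l
      induction l with
      | nil => intro o; rfl
      | cons x l ihl => intro o; rw [List.foldl_cons, List.foldl_cons, pvAstep_eq, ihl]
    rw [hinner, ih]

-- ===== VERDICT (by name: the statement is the Claim_ definition above) =====
theorem get_linkages_with_thresh_spec : Claim_equal_get_linkages_with_thresh := by
  intro pos_dict all_set offspring_thresh _hDom _hPre
  unfold Spec_get_linkages_with_thresh get_linkages_with_thresh get_linkages_with_thresh_alt
  simp only []
  rw [pvMainFold _ _ _ _ _ (fun k m h => by simp [PySem.Dict.get?_empty] at h)]
  rw [pvInvFold_eq]
  rfl
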